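-- pv_equiv track=rewrite | github.com/github-lily/SSAFY_PickTime | BACKEND/FastAPI/utils/chord_recognition.py | finger_positions_to_chord_shape
-- ===== SOURCE A (Python) =====
-- def finger_positions_to_chord_shape(finger_positions):
--     """
--     Convert finger positions to a chord shape representation.
--
--     Args:
--         finger_positions: Dictionary mapping fingers to string/fret positions
--
--     Returns:
--         List of 6 integers representing fret positions on each string (-1 for not played)
--     """
--     # Initialize chord shape with -1 (not played)
--     chord_shape = [-1] * 6
--
--     # Fill in the positions from finger mappings
--     for finger, data in finger_positions.items():
--         string_idx = data.get('string', -1)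
--         fret_idx = data.get('fret', -1)
--
--         # Make sure indices are valid
--         if 0 <= string_idx < 6 and fret_idx >= 0:
--             chord_shape[string_idx] = fret_idx
--
--     return chord_shape
-- ===== SOURCE B (Python) =====
-- def finger_positions_to_chord_shape(finger_positions):
--     """Per-slot lookup: for each of the 6 strings, scan the finger data
--     back-to-front for the last valid write to that string (last-write-wins,
--     same guard as the original)."""
--     entries = list(finger_positions.values())
--     shape = []
--     for s in range(6):
--         fret = -1
--         for data in reversed(entries):
--             f = data.get('fret', -1)
--             if data.get('string', -1) == s and f >= 0:
--                 fret = f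
--                 break
--         shape.append(fret)
--     return shape
-- ===== Notes on version B (the rewrite author's own statement) =====
-- stated objective: alternative
-- what changed: A allocates a 6-slot array and writes valid finger positions into it in order; B never builds an array to mutate: for each of the 6 output slots it scans the finger entries back-to-front and returns the last valid fret for that string (or -1), flipping the traversal from write-into-array to lookup-per-slot.
import Mathlib
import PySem

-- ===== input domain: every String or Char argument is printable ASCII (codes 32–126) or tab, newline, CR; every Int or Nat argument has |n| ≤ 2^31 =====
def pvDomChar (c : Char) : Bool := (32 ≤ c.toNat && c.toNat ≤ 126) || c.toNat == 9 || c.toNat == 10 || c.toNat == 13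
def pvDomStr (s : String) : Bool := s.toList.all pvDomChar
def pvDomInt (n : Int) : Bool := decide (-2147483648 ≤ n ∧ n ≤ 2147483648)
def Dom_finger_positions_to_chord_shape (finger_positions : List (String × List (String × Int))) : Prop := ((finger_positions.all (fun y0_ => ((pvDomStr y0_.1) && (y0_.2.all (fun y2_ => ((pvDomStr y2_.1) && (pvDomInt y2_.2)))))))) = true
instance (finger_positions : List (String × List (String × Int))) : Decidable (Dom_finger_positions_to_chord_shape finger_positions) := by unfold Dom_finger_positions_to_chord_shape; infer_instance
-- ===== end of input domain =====

-- B replaces A's mutate-a-6-slot-array loop by a per-slot backwards scan for the last valid write (alternative decomposition, same cost).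


-- ===== PORT A =====
-- one loop iteration: read string/fret from the data dict, write into the array if valid
def pvStepA (chord : List Int) (p : String × List (String × Int)) : List Int :=
  let data := PySem.Dict.mk p.2
  let string_idx := data.getD "string" (-1)
  let fret_idx := data.getD "fret" (-1)
  if 0 ≤ string_idx ∧ string_idx < 6 ∧ 0 ≤ fret_idx then
    chord.set string_idx.toNat fret_idx
  else chord

def finger_positions_to_chord_shape (finger_positions : List (String × List (String × Int))) : List Int :=
  finger_positions.foldl pvStepA [-1, -1, -1, -1, -1, -1]

-- ===== PORT B =====
-- scan the (reversed) finger data for the first valid fret on string s; -1 if none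
def pvLookupSlot (entries : List (List (String × Int))) (s : Int) : Int :=
  match entries with
  | [] => -1
  | data :: rest =>
    let d := PySem.Dict.mk data
    let f := d.getD "fret" (-1)
    if d.getD "string" (-1) = s ∧ 0 ≤ f then f else pvLookupSlot rest s

def finger_positions_to_chord_shape_alt (finger_positions : List (String × List (String × Int))) : List Int :=
  let entries := (finger_positions.map (·.2)).reverse
  (PySem.List.pyRange 0 6 1).map (fun s => pvLookupSlot entries s)

-- ===== PRECONDITION & SPEC =====
def Spec_finger_positions_to_chord_shape (finger_positions : List (String × List (String × Int))) (out : List Int) : Prop := out = finger_positions_to_chord_shape_alt finger_positions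
instance (finger_positions : List (String × List (String × Int))) (out : List Int) : Decidable (Spec_finger_positions_to_chord_shape finger_positions out) := by unfold Spec_finger_positions_to_chord_shape; infer_instance

-- ===== CLAIM (what is proved, stated in full; the proofs are below) =====
def Claim_equal_finger_positions_to_chord_shape : Prop := ∀ (finger_positions : List (String × List (String × Int))), Dom_finger_positions_to_chord_shape finger_positions → Spec_finger_positions_to_chord_shape finger_positions (finger_positions_to_chord_shape finger_positions)

-- ===== LEMMAS AND PROOFS =====

-- a matched slot always yields a nonnegative fret, so -1 marks "no match"
theorem pvLookupSlot_nonneg_or_neg_one (entries : List (List (String × Int))) (s : Int) :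
    pvLookupSlot entries s = -1 ∨ 0 ≤ pvLookupSlot entries s := by
  induction entries with
  | nil => left; rfl
  | cons d rest ih =>
    simp only [pvLookupSlot]
    split
    · right; omega
    · exact ih

-- first-match over an append: the left part wins unless it found nothing
theorem pvLookupSlot_append (l l' : List (List (String × Int))) (s : Int) :
    pvLookupSlot (l ++ l') s =
      if pvLookupSlot l s = -1 then pvLookupSlot l' s else pvLookupSlot l s := by
  induction l with
  | nil => simp [pvLookupSlot]
  | cons d rest ih =>
    simp only [List.cons_append, pvLookupSlot]
    by_cases h : (PySem.Dict.mk d).getD "string" (-1) = s ∧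
        0 ≤ (PySem.Dict.mk d).getD "fret" (-1)
    · rw [if_pos h, if_pos h, if_neg (by omega)]
    · rw [if_neg h, if_neg h, ih]

theorem getD_default_neg_one (n : Nat) :
    ([-1, -1, -1, -1, -1, -1] : List Int).getD n (-1) = -1 := by
  rcases n with _|_|_|_|_|_|n <;> rfl

-- main invariant: the fold's array, read per slot, is the backwards lookup with the
-- current array as fallback
theorem foldl_step_eq (fp : List (String × List (String × Int))) (chord : List Int)
    (hlen : chord.length = 6) :
    fp.foldl pvStepA chord =
      (List.range 6).map (fun (k : Nat) =>
        if pvLookupSlot ((fp.map (·.2)).reverse) ((k : Int)) = -1 then chord.getD k (-1)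
        else pvLookupSlot ((fp.map (·.2)).reverse) ((k : Int))) := by
  induction fp generalizing chord with
  | nil =>
    simp only [List.foldl_nil, List.map_nil, List.reverse_nil]
    apply List.ext_getElem
    · simp [hlen]
    · intro i h1 h2
      simp only [List.getElem_map, List.getElem_range, pvLookupSlot, if_pos]
      rw [List.getD_eq_getElem?_getD, List.getElem?_eq_getElem (by omega)]
      rfl
  | cons x rest ih =>
    have hlen' : (pvStepA chord x).length = 6 := by
      simp only [pvStepA]
      split <;> simp [hlen]
    rw [List.foldl_cons, ih (pvStepA chord x) hlen']
    apply List.map_congr_left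
    intro k hk
    simp only [List.mem_range] at hk
    simp only [List.map_cons, List.reverse_cons, pvLookupSlot_append]
    rcases pvLookupSlot_nonneg_or_neg_one ((rest.map (·.2)).reverse) ((k : Int)) with h | h
    · -- the tail found nothing: the result comes from x (or falls through to chord)
      simp only [if_pos h]
      simp only [pvLookupSlot]
      by_cases hx : (PySem.Dict.mk x.2).getD "string" (-1) = (k : Int) ∧
          0 ≤ (PySem.Dict.mk x.2).getD "fret" (-1)
      · rw [if_pos hx, if_neg (show ¬ (PySem.Dict.mk x.2).getD "fret" (-1) = -1 by omega)]
        simp only [pvStepA]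
        rw [if_pos ⟨by omega, by omega, hx.2⟩]
        have hkn : ((PySem.Dict.mk x.2).getD "string" (-1)).toNat = k := by omega
        rw [hkn, List.getD_eq_getElem?_getD, List.getElem?_set_self (by omega)]
        rfl
      · rw [if_neg hx, if_pos rfl]
        simp only [pvStepA]
        split
        · rename_i hg
          have hne : ((PySem.Dict.mk x.2).getD "string" (-1)).toNat ≠ k := by
            intro hEq
            exact hx ⟨by omega, hg.2.2⟩
          rw [List.getD_eq_getElem?_getD, List.getElem?_set_ne hne,
            ← List.getD_eq_getElem?_getD]
        · rfl
    · -- the tail found a value: x is irrelevant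
      have hne : ¬ pvLookupSlot ((rest.map (·.2)).reverse) ((k : Int)) = -1 := by omega
      simp only [if_neg hne]

theorem range6_cast : PySem.List.pyRange 0 6 1 = List.map (fun (k : Nat) => (k : Int)) (List.range 6) := by
  decide

-- ===== VERDICT (by name: the statement is the Claim_ definition above) =====
theorem finger_positions_to_chord_shape_spec : Claim_equal_finger_positions_to_chord_shape := by
  intro fp _
  unfold Spec_finger_positions_to_chord_shape finger_positions_to_chord_shape
  simp only [finger_positions_to_chord_shape_alt]
  rw [foldl_step_eq fp [-1, -1, -1, -1, -1, -1] rfl, range6_cast, List.map_map]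
  apply List.map_congr_left
  intro k _
  simp only [Function.comp]
  split
  · rename_i h
    rw [getD_default_neg_one k, h]
  · rfl
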